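-- pv_equiv track=rewrite | github.com/Eastar-DS/Python | 14 Days Study Plan about Data_Structure/Data_Structure1.py | canConstruct2
-- ===== SOURCE A (Python) =====
-- def canConstruct2(ransomNote: str, magazine: str) -> bool:
--     "Runtime: 40 ms, faster than 93.17%"
--     from collections import Counter
--     ran_count = Counter(ransomNote)
--     output = True
--
--     for string in ran_count:
--         count = ran_count[string]
--         if(string in magazine):
--             if(magazine.count(string) < count):
--                 output = False
--         else:
--             output = False
--     return output
-- ===== SOURCE B (Python) =====
-- def canConstruct2(ransomNote: str, magazine: str) -> bool:
--     from collections import Counter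
--     pool = Counter(magazine)
--     for ch in ransomNote:
--         if pool[ch] == 0:
--             return False
--         pool[ch] -= 1
--     return True
-- ===== Notes on version B (the rewrite author's own statement) =====
-- stated objective: simpler
-- what changed: Instead of counting ransomNote first and rescanning magazine with magazine.count per unique letter, B builds one Counter of magazine and does a single early-exit pass over ransomNote's characters, decrementing the pool.
import Mathlib
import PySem

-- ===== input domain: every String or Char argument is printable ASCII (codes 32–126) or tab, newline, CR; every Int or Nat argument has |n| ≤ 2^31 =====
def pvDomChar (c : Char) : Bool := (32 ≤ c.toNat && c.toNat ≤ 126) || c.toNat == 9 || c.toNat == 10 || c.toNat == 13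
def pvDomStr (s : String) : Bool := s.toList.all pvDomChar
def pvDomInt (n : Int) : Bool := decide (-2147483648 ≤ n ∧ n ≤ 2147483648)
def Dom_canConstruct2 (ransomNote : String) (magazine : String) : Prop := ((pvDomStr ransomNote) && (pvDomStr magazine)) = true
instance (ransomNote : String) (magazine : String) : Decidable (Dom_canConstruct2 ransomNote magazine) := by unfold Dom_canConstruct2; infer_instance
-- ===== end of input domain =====

-- B replaces A's count-ransom-then-rescan-magazine-per-unique-letter pattern with one
-- decrementing pass over ransomNote against a Counter(magazine) pool (objective: simpler).

-- ===== PORT A =====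
-- Counter(ransomNote); for string in ran_count: count = ran_count[string];
-- if string in magazine: if magazine.count(string) < count: output = False; else: output = False
def canConstruct2 (ransomNote : String) (magazine : String) : Bool :=
  let ranCount := PySem.Dict.counter ransomNote.toList
  ranCount.keys.foldl (fun output string =>
    let count := ranCount.getD string 0
    if PySem.Chars.isIn [string] magazine.toList then
      if (PySem.Chars.count magazine.toList [string] : Int) < count then false else output
    else false) true

-- ===== PORT B =====
-- pool = Counter(magazine); for ch in ransomNote: if pool[ch] == 0: return False; pool[ch] -= 1
def canConstruct2Go (pool : PySem.Dict Char Int) : List Char → Bool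
  | [] => true
  | c :: cs =>
      if pool.getD c 0 == 0 then false
      else canConstruct2Go (pool.modify c 0 (· - 1)) cs

def canConstruct2_alt (ransomNote : String) (magazine : String) : Bool :=
  canConstruct2Go (PySem.Dict.counter magazine.toList) ransomNote.toList

-- ===== PRECONDITION & SPEC =====
def Spec_canConstruct2 (ransomNote : String) (magazine : String) (out : Bool) : Prop := out = canConstruct2_alt ransomNote magazine
instance (ransomNote : String) (magazine : String) (out : Bool) : Decidable (Spec_canConstruct2 ransomNote magazine out) := by unfold Spec_canConstruct2; infer_instance

-- ===== CLAIM (what is proved, stated in full; the proofs are below) =====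
def Claim_equal_canConstruct2 : Prop := ∀ (ransomNote : String) (magazine : String), Dom_canConstruct2 ransomNote magazine → Spec_canConstruct2 ransomNote magazine (canConstruct2 ransomNote magazine)

-- ===== LEMMAS AND PROOFS =====

-- A's substring count for a single-character needle is the element count.
lemma count_go_singleton (c : Char) (l : List Char) :
    ∀ fuel acc, l.length ≤ fuel →
      PySem.Chars.count.go [c] fuel l acc = acc + l.count c := by
  induction l with
  | nil =>
      intro fuel acc _
      cases fuel <;> simp [PySem.Chars.count.go]
  | cons h t ih =>
      intro fuel acc hf
      cases fuel with
      | zero => simp at hf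
      | succ n =>
          simp only [PySem.Chars.count.go, List.isPrefixOf, Bool.and_true,
            List.length_singleton, List.drop_succ_cons, List.drop_zero]
          by_cases hch : c = h
          · subst hch
            rw [if_pos (by simp)]
            rw [ih n (acc + 1) (by simpa using hf)]
            simp
            omega
          · rw [if_neg (by simpa using hch)]
            rw [ih n acc (by simpa using hf)]
            simp [Ne.symm hch]

lemma count_singleton (ms : List Char) (c : Char) :
    PySem.Chars.count ms [c] = ms.count c := by
  rw [PySem.Chars.count, if_neg (by simp)]
  simpa using count_go_singleton c ms ms.length 0 le_rfl

-- A's accumulator loop is an `all` over the keys (body in A's exact branch shape).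
lemma foldl_if_all (p q : Char → Prop) [DecidablePred p] [DecidablePred q]
    (l : List Char) (out : Bool) :
    l.foldl (fun o k => if p k then (if q k then false else o) else false) out
      = (out && l.all (fun k => decide (p k) && !decide (q k))) := by
  induction l generalizing out with
  | nil => simp
  | cons k l ih =>
      simp only [List.foldl_cons, List.all_cons, ih]
      by_cases h : p k <;> by_cases h2 : q k <;>
        simp [h, h2, Bool.and_comm]

-- B's loop says: every remaining char still has stock in the pool.
lemma canConstruct2Go_iff (cs : List Char) (pool : PySem.Dict Char Int)
    (hnn : ∀ k, 0 ≤ pool.getD k 0) :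
    canConstruct2Go pool cs = true ↔ ∀ c ∈ cs, (cs.count c : Int) ≤ pool.getD c 0 := by
  induction cs generalizing pool with
  | nil => simp [canConstruct2Go]
  | cons c cs ih =>
      simp only [canConstruct2Go]
      by_cases h0 : pool.getD c 0 = 0
      · simp only [h0, beq_self_eq_true, if_true]
        constructor
        · intro h; cases h
        · intro h
          have := h c (by simp)
          simp [h0] at this
          omega
      · have hpos : 0 < pool.getD c 0 := lt_of_le_of_ne (hnn c) (Ne.symm h0)
        have hb : (pool.getD c 0 == 0) = false := by simpa using h0
        rw [hb, if_neg (by simp)]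
        have hnn' : ∀ k, 0 ≤ (pool.modify c 0 (· - 1)).getD k 0 := by
          intro k
          rw [PySem.Dict.getD_modify]
          split_ifs with hk
          · omega
          · exact hnn k
        rw [ih _ hnn']
        constructor
        · intro h k hk
          by_cases hkc : k = c
          · subst hkc
            by_cases hmem : k ∈ cs
            · have := h k hmem
              rw [PySem.Dict.getD_modify, if_pos rfl] at this
              simp
              omega
            · simp [List.count_eq_zero_of_not_mem hmem]
              omega
          · rw [List.mem_cons] at hk
            rcases hk with hk | hk
            · exact absurd hk hkc
            · have := h k hk
              rw [PySem.Dict.getD_modify, if_neg hkc] at this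
              simpa [List.count_cons, Ne.symm hkc] using this
        · intro h k hk
          rw [PySem.Dict.getD_modify]
          by_cases hkc : k = c
          · subst hkc
            have := h k (by simp)
            
            simp at this
            omega
          · rw [if_neg hkc]
            have := h k (List.mem_cons_of_mem _ hk)
            simpa [List.count_cons, Ne.symm hkc] using this

lemma canConstruct2_alt_iff (ransomNote magazine : String) :
    canConstruct2_alt ransomNote magazine = true ↔
      ∀ c ∈ ransomNote.toList,
        (ransomNote.toList.count c : Int) ≤ (magazine.toList.count c : Int) := by
  unfold canConstruct2_alt
  rw [canConstruct2Go_iff _ _ (by intro k; rw [PySem.Dict.getD_counter]; positivity)]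
  simp [PySem.Dict.getD_counter]

lemma canConstruct2_iff (ransomNote magazine : String) :
    canConstruct2 ransomNote magazine = true ↔
      ∀ c ∈ ransomNote.toList,
        (ransomNote.toList.count c : Int) ≤ (magazine.toList.count c : Int) := by
  simp only [canConstruct2]
  rw [foldl_if_all]
  simp only [Bool.true_and, List.all_eq_true, Bool.and_eq_true, Bool.not_eq_true',
    PySem.Dict.keys_counter, PySem.Dict.getD_counter, decide_eq_true_eq,
    decide_eq_false_iff_not, PySem.Set.mem_ofList, not_lt, count_singleton,
    PySem.Chars.isIn_iff_infix, List.singleton_infix_iff]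
  constructor
  · intro h c hc
    exact_mod_cast (h c hc).2
  · intro h k hk
    have hle := h k hk
    have hpos : 0 < ransomNote.toList.count k := List.count_pos_iff.mpr hk
    have hm : (0:Int) < (magazine.toList.count k : Int) :=
      lt_of_lt_of_le (by exact_mod_cast hpos) hle
    exact ⟨List.count_pos_iff.mp (by exact_mod_cast hm), by exact_mod_cast hle⟩

-- ===== VERDICT (by name: the statement is the Claim_ definition above) =====
theorem canConstruct2_spec : Claim_equal_canConstruct2 := by
  intro ransomNote magazine _
  unfold Spec_canConstruct2
  rw [Bool.eq_iff_iff, canConstruct2_iff, canConstruct2_alt_iff]
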